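-- pv_equiv track=rewrite | github.com/LarocheOlivier/Automate | functions.py | get_numbers_trans_av_ap
-- ===== SOURCE A (Python) =====
-- def get_numbers_trans_av_ap(chaine_trans):
--     # Permet de détecter la fin de la chaine
--     chaine_trans = chaine_trans + "."
--     liste_finale = []
--     str = ""
--     for i in range(0, len(chaine_trans)):
--         # Si le caractère se trouve entre "a" et "z" sans le "i" == symbole de l'automate
--         if chaine_trans[i] > chr(96) and chaine_trans[i] < chr(105) or chaine_trans[i] > chr(105) and chaine_trans[i] < chr(123) or chaine_trans[i] == ".":
--             liste_finale.append(str)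
--             str = ""
--         else:
--             str = str + chaine_trans[i]
--
--     return liste_finale
-- ===== SOURCE B (Python) =====
-- import re
--
-- def get_numbers_trans_av_ap(chaine_trans):
--     # re.split on the delimiter class (a-z except 'i', plus literal '.') produces
--     # exactly A's segments, including the trailing one A flushes via the appended '.'
--     return re.split(r'[a-hj-z.]', chaine_trans)
-- ===== Notes on version B (the rewrite author's own statement) =====
-- stated objective: idiomatic
-- what changed: Replaces the manual index loop with appended sentinel '.' and string accumulator by a single regex split re.split(r'[a-hj-z.]', ...) on the original string.
import Mathlib
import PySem

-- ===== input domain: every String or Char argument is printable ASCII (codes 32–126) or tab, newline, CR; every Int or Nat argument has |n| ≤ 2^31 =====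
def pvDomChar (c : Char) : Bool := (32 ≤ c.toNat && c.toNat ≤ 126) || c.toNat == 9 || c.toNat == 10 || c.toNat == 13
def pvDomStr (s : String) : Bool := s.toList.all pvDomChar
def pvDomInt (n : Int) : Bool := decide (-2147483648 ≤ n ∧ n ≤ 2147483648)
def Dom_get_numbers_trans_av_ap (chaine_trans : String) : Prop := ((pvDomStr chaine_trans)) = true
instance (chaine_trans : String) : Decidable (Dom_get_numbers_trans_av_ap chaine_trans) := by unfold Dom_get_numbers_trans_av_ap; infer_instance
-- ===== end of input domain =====

-- B replaces A's manual accumulator loop (with a sentinel '.' appended) by a single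
-- regex split on the original string (idiomatic); proved to return the same list.


-- ===== PORT A =====
-- A's delimiter test: chr(96) < c < chr(105) or chr(105) < c < chr(123) or c == '.'
def aIsDelim (c : Char) : Bool :=
  ((Char.ofNat 96) < c && c < (Char.ofNat 105)) || ((Char.ofNat 105) < c && c < (Char.ofNat 123)) || c == '.'

-- the 'for i in range(0, len(chaine_trans))' loop with state (liste_finale, str)
def aLoop : List Char → List String → String → List String
  | [], acc, _ => acc
  | c :: rest, acc, cur =>
      if aIsDelim c then aLoop rest (acc ++ [cur]) ""
      else aLoop rest acc (cur ++ String.singleton c)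

def get_numbers_trans_av_ap (chaine_trans : String) : List String :=
  aLoop (chaine_trans ++ ".").toList [] ""

-- ===== PORT B =====
-- B's character class [a-hj-z.]
def bIsDelim (c : Char) : Bool :=
  ('a' ≤ c && c ≤ 'h') || ('j' ≤ c && c ≤ 'z') || c == '.'

-- hand port of re.split on a single-character class: exact — splits at every matching
-- char, keeping empty segments, with a final (possibly empty) segment.
def reSplit (p : Char → Bool) : List Char → List (List Char)
  | [] => [[]]
  | c :: rest =>
      if p c then [] :: reSplit p rest
      else match reSplit p rest with
        | h :: t => (c :: h) :: t
        | [] => [[c]]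

def get_numbers_trans_av_ap_alt (chaine_trans : String) : List String :=
  (reSplit bIsDelim chaine_trans.toList).map String.ofList

-- ===== PRECONDITION & SPEC =====
def Spec_get_numbers_trans_av_ap (chaine_trans : String) (out : List String) : Prop := out = get_numbers_trans_av_ap_alt chaine_trans
instance (chaine_trans : String) (out : List String) : Decidable (Spec_get_numbers_trans_av_ap chaine_trans out) := by unfold Spec_get_numbers_trans_av_ap; infer_instance

-- ===== CLAIM (what is proved, stated in full; the proofs are below) =====
def Claim_equal_get_numbers_trans_av_ap : Prop := ∀ (chaine_trans : String), Dom_get_numbers_trans_av_ap chaine_trans → Spec_get_numbers_trans_av_ap chaine_trans (get_numbers_trans_av_ap chaine_trans)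

-- ===== LEMMAS AND PROOFS =====

theorem isDelim_eq : ∀ c, aIsDelim c = bIsDelim c := by
  intro c
  have h96 : (Char.ofNat 96).val.toNat = 96 := by decide
  have h105 : (Char.ofNat 105).val.toNat = 105 := by decide
  have h123 : (Char.ofNat 123).val.toNat = 123 := by decide
  have ha : ('a').val.toNat = 97 := by decide
  have hh : ('h').val.toNat = 104 := by decide
  have hj : ('j').val.toNat = 106 := by decide
  have hz : ('z').val.toNat = 122 := by decide
  simp only [aIsDelim, bIsDelim]
  rw [Bool.eq_iff_iff]
  simp only [Bool.or_eq_true, Bool.and_eq_true,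
    decide_eq_true_eq, beq_iff_eq, Char.le_def, Char.lt_def,
    UInt32.le_iff_toNat_le, UInt32.lt_iff_toNat_lt, h96, h105, h123, ha, hh, hj, hz]
  constructor <;> rintro ((⟨h1, h2⟩ | ⟨h1, h2⟩) | h) <;>
    first
    | (left; left; omega)
    | (left; right; omega)
    | (right; exact h)

theorem reSplit_ne_nil (p : Char → Bool) (l : List Char) : reSplit p l ≠ [] := by
  cases l with
  | nil => simp [reSplit]
  | cons c rest =>
    simp only [reSplit]
    split
    · simp
    · cases h : reSplit p rest <;> simp

-- prepend cur to the head segment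
def consHead (cur : List Char) : List (List Char) → List (List Char)
  | [] => [cur]
  | h :: t => (cur ++ h) :: t

theorem aLoop_reSplit (l : List Char) : ∀ (acc : List String) (cur : List Char),
    aLoop (l ++ ['.']) acc (String.ofList cur)
      = acc ++ (consHead cur (reSplit bIsDelim l)).map String.ofList := by
  induction l with
  | nil =>
    intro acc cur
    simp [aLoop, aIsDelim, reSplit, consHead]
  | cons c rest ih =>
    intro acc cur
    simp only [List.cons_append, aLoop, isDelim_eq c]
    by_cases h : bIsDelim c = true
    · rw [if_pos h]
      have he : ("" : String) = String.ofList [] := by rw [← String.toList_inj]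
      rw [he, ih (acc ++ [String.ofList cur]) []]
      cases hr : reSplit bIsDelim rest with
      | nil => exact absurd hr (reSplit_ne_nil _ _)
      | cons a b => simp [reSplit, h, hr, consHead]
    · rw [if_neg h]
      have hs : String.ofList cur ++ String.singleton c = String.ofList (cur ++ [c]) := by
        rw [← String.toList_inj]; simp
      rw [hs, ih acc (cur ++ [c])]
      cases hr : reSplit bIsDelim rest with
      | nil => exact absurd hr (reSplit_ne_nil _ _)
      | cons a b => simp [reSplit, h, hr, consHead]

-- ===== VERDICT (by name: the statement is the Claim_ definition above) =====
theorem get_numbers_trans_av_ap_spec : Claim_equal_get_numbers_trans_av_ap := by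
  intro s _
  unfold Spec_get_numbers_trans_av_ap get_numbers_trans_av_ap get_numbers_trans_av_ap_alt
  have h1 : (s ++ ".").toList = s.toList ++ ['.'] := by simp
  have h2 : ("" : String) = String.ofList [] := rfl
  rw [h1, h2, aLoop_reSplit s.toList [] []]
  cases hr : reSplit bIsDelim s.toList with
  | nil => exact absurd hr (reSplit_ne_nil _ _)
  | cons a b => simp [consHead]
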